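-- pv_equiv track=rewrite | github.com/hitsz-oyx/single_seg | single_seg/single_object_segmenter.py | build_prompt_grid_layout
-- ===== SOURCE A (Python) =====
-- import math
--
-- def build_prompt_grid_layout(prompt_ids: list[str], ref_cell: int, max_cols: int) -> dict[str, tuple[int, int]]:
--     cols = min(max(max_cols, 1), max(1, math.ceil(math.sqrt(len(prompt_ids)))))
--     layout: dict[str, tuple[int, int]] = {}
--     for idx, prompt_id in enumerate(prompt_ids):
--         col = idx % cols
--         row = idx // cols
--         layout[prompt_id] = (col * ref_cell, row * ref_cell)
--     return layout
-- ===== SOURCE B (Python) =====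
-- import math
--
-- def build_prompt_grid_layout(prompt_ids: list[str], ref_cell: int, max_cols: int) -> dict[str, tuple[int, int]]:
--     cols = min(max(max_cols, 1), max(1, math.ceil(math.sqrt(len(prompt_ids)))))
--     layout: dict[str, tuple[int, int]] = {}
--     row = 0
--     rest = prompt_ids
--     while rest:
--         for col, pid in enumerate(rest[:cols]):
--             layout[pid] = (col * ref_cell, row * ref_cell)
--         rest = rest[cols:]
--         row += 1
--     return layout
-- ===== Notes on version B (the rewrite author's own statement) =====
-- stated objective: alternative
-- what changed: B replaces the flat single pass with idx % cols / idx // cols arithmetic by a row-by-row traversal that slices the list into rows of length cols and enumerates columns within each slice, so no division or modulo is computed.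
import Mathlib
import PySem

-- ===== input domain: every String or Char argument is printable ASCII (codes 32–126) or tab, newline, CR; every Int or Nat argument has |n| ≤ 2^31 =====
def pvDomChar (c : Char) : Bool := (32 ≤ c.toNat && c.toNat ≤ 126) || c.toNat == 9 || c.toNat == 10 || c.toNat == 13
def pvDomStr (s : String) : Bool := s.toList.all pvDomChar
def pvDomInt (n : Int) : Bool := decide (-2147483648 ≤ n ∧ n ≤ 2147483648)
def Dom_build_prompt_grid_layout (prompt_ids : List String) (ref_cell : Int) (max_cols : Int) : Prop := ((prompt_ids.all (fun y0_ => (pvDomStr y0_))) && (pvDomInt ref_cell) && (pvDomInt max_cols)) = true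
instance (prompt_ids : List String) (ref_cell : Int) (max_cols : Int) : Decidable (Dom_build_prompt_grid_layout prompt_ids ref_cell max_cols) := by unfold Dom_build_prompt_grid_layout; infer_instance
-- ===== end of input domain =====

-- B replaces A's flat idx%cols / idx//cols pass by a row-by-row slicing traversal with no div/mod (alternative decomposition, same cost).


-- ===== PORT A =====
-- exact value of math.ceil(math.sqrt(n)): the least k with n ≤ k*k
def pvCeilSqrt (n : Nat) : Nat :=
  if Nat.sqrt n * Nat.sqrt n == n then Nat.sqrt n else Nat.sqrt n + 1

def build_prompt_grid_layout (prompt_ids : List String) (ref_cell : Int) (max_cols : Int) : List (String × Int × Int) :=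
  let cols : Int := min (max max_cols 1) (max 1 ((pvCeilSqrt prompt_ids.length : Nat) : Int))
  let layout : PySem.Dict String (Int × Int) :=
    (PySem.List.enumerate prompt_ids 0).foldl
      (fun d p =>
        let col := PySem.Int.mod p.1 cols
        let row := PySem.Int.floordiv p.1 cols
        d.insert p.2 (col * ref_cell, row * ref_cell))
      PySem.Dict.empty
  layout.items

-- ===== PORT B =====
-- inner 'for col, pid in enumerate(rest[:cols])'
def pvFillRow (ref_cell : Int) (row : Int) (d : PySem.Dict String (Int × Int)) (chunk : List String) : PySem.Dict String (Int × Int) :=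
  (PySem.List.enumerate chunk 0).foldl
    (fun d p => d.insert p.2 (p.1 * ref_cell, row * ref_cell)) d

-- outer 'while rest:' loop; 'rest[cols:]' on a nonempty list is written xs.drop (cols-1)
-- (equal to (x::xs).drop cols whenever cols ≥ 1, which the caller guarantees) so the
-- recursion is structurally decreasing on the list length.
def pvFillGrid (cols : Nat) (ref_cell : Int) : List String → Int → PySem.Dict String (Int × Int) → PySem.Dict String (Int × Int)
  | [], _, d => d
  | x :: xs, row, d =>
      pvFillGrid cols ref_cell (xs.drop (cols - 1)) (row + 1) (pvFillRow ref_cell row d ((x :: xs).take cols))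
termination_by ids => ids.length
decreasing_by simp

def build_prompt_grid_layout_alt (prompt_ids : List String) (ref_cell : Int) (max_cols : Int) : List (String × Int × Int) :=
  let cols : Int := min (max max_cols 1) (max 1 ((pvCeilSqrt prompt_ids.length : Nat) : Int))
  (pvFillGrid cols.toNat ref_cell prompt_ids 0 PySem.Dict.empty).items

-- ===== PRECONDITION & SPEC =====
def Spec_build_prompt_grid_layout (prompt_ids : List String) (ref_cell : Int) (max_cols : Int) (out : List (String × Int × Int)) : Prop := out = build_prompt_grid_layout_alt prompt_ids ref_cell max_cols
instance (prompt_ids : List String) (ref_cell : Int) (max_cols : Int) (out : List (String × Int × Int)) : Decidable (Spec_build_prompt_grid_layout prompt_ids ref_cell max_cols out) := by unfold Spec_build_prompt_grid_layout; infer_instance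

-- ===== CLAIM (what is proved, stated in full; the proofs are below) =====
def Claim_equal_build_prompt_grid_layout : Prop := ∀ (prompt_ids : List String) (ref_cell : Int) (max_cols : Int), Dom_build_prompt_grid_layout prompt_ids ref_cell max_cols → Spec_build_prompt_grid_layout prompt_ids ref_cell max_cols (build_prompt_grid_layout prompt_ids ref_cell max_cols)

-- ===== LEMMAS AND PROOFS =====

-- A's loop body, abstracted over cols/ref_cell
def pvFA (cols ref_cell : Int) (d : PySem.Dict String (Int × Int)) (p : Int × String) : PySem.Dict String (Int × Int) :=
  d.insert p.2 (PySem.Int.mod p.1 cols * ref_cell, PySem.Int.floordiv p.1 cols * ref_cell)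

lemma pv_foldl_enumerate_append {α β : Type} (f : β → Int × α → β) (t r : List α) (s : Int) (d : β) :
    (PySem.List.enumerate (t ++ r) s).foldl f d
      = (PySem.List.enumerate r (s + t.length)).foldl f ((PySem.List.enumerate t s).foldl f d) := by
  induction t generalizing s d with
  | nil => simp [PySem.List.enumerate_nil]
  | cons x xs ih =>
      simp only [List.cons_append, PySem.List.enumerate_cons, List.foldl_cons, ih]
      have hst : s + 1 + (xs.length : Int) = s + ((x :: xs).length : Int) := by
        simp only [List.length_cons]; push_cast; ring
      rw [hst]

lemma pv_row_eq (cols : Int) (hc : 0 < cols) (ref_cell row : Int)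
    (chunk : List String) (j : Int) (hj : 0 ≤ j) (hlen : j + chunk.length ≤ cols)
    (d : PySem.Dict String (Int × Int)) :
    (PySem.List.enumerate chunk j).foldl
        (fun d p => d.insert p.2 (p.1 * ref_cell, row * ref_cell)) d
      = (PySem.List.enumerate chunk (row * cols + j)).foldl (pvFA cols ref_cell) d := by
  induction chunk generalizing j d with
  | nil => simp [PySem.List.enumerate_nil]
  | cons x xs ih =>
      simp only [PySem.List.enumerate_cons, List.foldl_cons]
      have hjc : j < cols := by
        have := xs.length.cast_nonneg (α := Int)
        simp only [List.length_cons] at hlen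
        push_cast at hlen; omega
      have hmod : PySem.Int.mod (row * cols + j) cols = j := by
        rw [PySem.Int.mod_eq_emod_of_pos hc,
          show row * cols + j = j + cols * row by ring, Int.add_mul_emod_self_left]
        exact Int.emod_eq_of_lt hj hjc
      have hdiv : PySem.Int.floordiv (row * cols + j) cols = row := by
        rw [PySem.Int.floordiv_eq_ediv_of_pos hc]
        rw [show row * cols + j = j + cols * row by ring,
          Int.add_mul_ediv_left _ _ (by omega : cols ≠ 0), Int.ediv_eq_zero_of_lt hj hjc]
        ring
      have harg : pvFA cols ref_cell d (row * cols + j, x)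
          = d.insert x (j * ref_cell, row * ref_cell) := by
        simp [pvFA, hmod, hdiv]
      rw [harg]
      have := ih (j + 1) (by omega) (by simp only [List.length_cons] at hlen; push_cast at hlen ⊢; omega)
        (d.insert x (j * ref_cell, row * ref_cell))
      rw [this]; ring_nf

lemma pv_grid_aux (cols : Nat) (hc : 0 < cols) (ref_cell : Int) :
    ∀ (n : Nat) (ids : List String), ids.length ≤ n → ∀ (row : Int), 0 ≤ row →
    ∀ (d : PySem.Dict String (Int × Int)),
    pvFillGrid cols ref_cell ids row d
      = (PySem.List.enumerate ids (row * (cols : Int))).foldl (pvFA (cols : Int) ref_cell) d := by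
  intro n
  induction n with
  | zero =>
      intro ids h row hrow d
      have : ids = [] := List.eq_nil_of_length_eq_zero (by omega)
      subst this
      simp [pvFillGrid, PySem.List.enumerate_nil]
  | succ n ih =>
      intro ids h row hrow d
      match ids with
      | [] => simp [pvFillGrid, PySem.List.enumerate_nil]
      | x :: xs =>
        rw [pvFillGrid]
        have hsplit := pv_foldl_enumerate_append (pvFA (cols : Int) ref_cell)
          ((x :: xs).take cols) ((x :: xs).drop cols) (row * (cols : Int)) d
        rw [List.take_append_drop cols (x :: xs)] at hsplit
        rw [hsplit]
        simp only [pvFillRow]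
        have hrowlem := pv_row_eq (cols : Int) (by exact_mod_cast hc) ref_cell row
          ((x :: xs).take cols) 0 le_rfl
          (by simp [List.length_take]) d
        simp only [add_zero] at hrowlem
        rw [← hrowlem]
        have hdrop : (x :: xs).drop cols = xs.drop (cols - 1) := by
          obtain ⟨c, rfl⟩ := Nat.exists_eq_succ_of_ne_zero (by omega : cols ≠ 0)
          simp
        rw [hdrop]
        by_cases hle : xs.length < cols
        · have hnil : xs.drop (cols - 1) = [] := by
            rw [List.drop_eq_nil_iff]; omega
          rw [hnil]
          simp [pvFillGrid, PySem.List.enumerate_nil]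
        · have hlen : (((x :: xs).take cols).length : Int) = (cols : Int) := by
            simp [List.length_take]; omega
          rw [hlen]
          have hstart : row * (cols : Int) + (cols : Int) = (row + 1) * (cols : Int) := by ring
          rw [hstart]
          have hsub : (xs.drop (cols - 1)).length ≤ n := by
            simp only [List.length_cons] at h
            simp [List.length_drop]; omega
          rw [ih _ hsub (row + 1) (by omega)]

-- ===== VERDICT (by name: the statement is the Claim_ definition above) =====
theorem build_prompt_grid_layout_spec : Claim_equal_build_prompt_grid_layout := by
  intro prompt_ids ref_cell max_cols _
  unfold Spec_build_prompt_grid_layout build_prompt_grid_layout build_prompt_grid_layout_alt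
  dsimp only
  generalize hg : min (max max_cols 1) (max 1 ((pvCeilSqrt prompt_ids.length : Nat) : Int)) = cols
  have hc1 : 1 ≤ cols := by
    rw [← hg]
    exact le_min (le_max_right _ _) (le_max_left _ _)
  have hcast : ((cols.toNat : Nat) : Int) = cols := by omega
  have hgrid := pv_grid_aux cols.toNat (by omega) ref_cell prompt_ids.length prompt_ids le_rfl 0 le_rfl PySem.Dict.empty
  rw [hcast] at hgrid
  simp only [zero_mul] at hgrid
  have heq : (fun (d : PySem.Dict String (Int × Int)) (p : Int × String) =>
      d.insert p.2 (PySem.Int.mod p.1 cols * ref_cell, PySem.Int.floordiv p.1 cols * ref_cell))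
      = pvFA cols ref_cell := rfl
  rw [hgrid, ← heq]
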